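-- pv_equiv track=rewrite | github.com/ainkinen/AoC2015 | aoc2015/day11/__init__.py | has_increasing_chain
-- ===== SOURCE A (Python) =====
-- def has_increasing_chain(string: str) -> bool:
--     for i in range(2, len(string)):
--         a = ord(string[i - 2])
--         b = ord(string[i - 1])
--         c = ord(string[i])
--
--         if a == c - 2 and b == c - 1:
--             return True
--
--     return False
-- ===== SOURCE B (Python) =====
-- def has_increasing_chain(string: str) -> bool:
--     streak = 1
--     for prev, curr in zip(string, string[1:]):
--         if ord(curr) == ord(prev) + 1:
--             streak += 1
--             if streak >= 3:
--                 return True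
--         else:
--             streak = 1
--     return False
-- ===== Notes on version B (the rewrite author's own statement) =====
-- stated objective: alternative
-- what changed: Replaces the independent three-character window check at each index by a single pass over adjacent pairs that maintains the length of the current consecutive-increment streak, returning True when it reaches 3.
import Mathlib
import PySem

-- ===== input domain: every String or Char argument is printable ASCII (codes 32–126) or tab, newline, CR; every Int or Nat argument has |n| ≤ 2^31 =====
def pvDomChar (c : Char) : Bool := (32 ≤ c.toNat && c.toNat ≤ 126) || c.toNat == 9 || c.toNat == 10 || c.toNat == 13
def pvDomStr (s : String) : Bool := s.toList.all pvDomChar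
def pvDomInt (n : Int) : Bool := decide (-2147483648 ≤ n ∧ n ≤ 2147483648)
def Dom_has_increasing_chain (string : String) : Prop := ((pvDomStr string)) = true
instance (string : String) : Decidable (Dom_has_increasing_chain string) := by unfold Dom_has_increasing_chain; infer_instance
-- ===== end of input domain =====

-- B replaces A's per-index three-character window test by a running streak counter over adjacent pairs (alternative decomposition, same cost).

-- ===== PORT A =====
-- A's loop `for i in range(2, len(string))` with early return: recursion on the index i.
def hicLoopA (cs : List Char) (i : Nat) : Bool :=
  if _h : i < cs.length then
    let a : Int := (cs.getD (i - 2) default).toNat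
    let b : Int := (cs.getD (i - 1) default).toNat
    let c : Int := (cs.getD i default).toNat
    if a == c - 2 && b == c - 1 then true else hicLoopA cs (i + 1)
  else false
termination_by cs.length - i

def has_increasing_chain (string : String) : Bool :=
  hicLoopA string.toList 2

-- ===== PORT B =====
-- B's loop over zip(string, string[1:]) carrying (prev, streak), with early return at streak ≥ 3.
def hicLoopB (prev : Char) (rest : List Char) (streak : Nat) : Bool :=
  match rest with
  | [] => false
  | curr :: rs =>
    if curr.toNat == prev.toNat + 1 then
      let s := streak + 1
      if 3 ≤ s then true else hicLoopB curr rs s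
    else hicLoopB curr rs 1

def has_increasing_chain_alt (string : String) : Bool :=
  match string.toList with
  | [] => false
  | p :: rest => hicLoopB p rest 1

-- ===== PRECONDITION & SPEC =====
def Spec_has_increasing_chain (string : String) (out : Bool) : Prop := out = has_increasing_chain_alt string
instance (string : String) (out : Bool) : Decidable (Spec_has_increasing_chain string out) := by unfold Spec_has_increasing_chain; infer_instance

-- ===== CLAIM (what is proved, stated in full; the proofs are below) =====
def Claim_equal_has_increasing_chain : Prop := ∀ (string : String), Dom_has_increasing_chain string → Spec_has_increasing_chain string (has_increasing_chain string)

-- ===== LEMMAS AND PROOFS =====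

-- reference predicate: some window of three consecutive positions is an increasing run
def chain3 : List Char → Bool
  | x :: y :: z :: r => (y.toNat == x.toNat + 1 && z.toNat == y.toNat + 1) || chain3 (y :: z :: r)
  | _ => false

theorem chain3_cons (x y z : Char) (r : List Char) :
    chain3 (x :: y :: z :: r)
      = ((y.toNat == x.toNat + 1 && z.toNat == y.toNat + 1) || chain3 (y :: z :: r)) := rfl

theorem chain3_short (l : List Char) (h : l.length < 3) : chain3 l = false := by
  match l with
  | [] => rfl
  | [_] => rfl
  | [_, _] => rfl
  | _ :: _ :: _ :: _ => simp at h; omega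

theorem hicLoopA_eq_chain3 (n : Nat) : ∀ (cs : List Char) (k : Nat), cs.length - k ≤ n →
    hicLoopA cs (k + 2) = chain3 (cs.drop k) := by
  induction n with
  | zero =>
    intro cs k h
    rw [hicLoopA, dif_neg (by omega)]
    rw [chain3_short _ (by simp; omega)]
  | succ n ih =>
    intro cs k h
    by_cases hlt : k + 2 < cs.length
    · have h0 : k < cs.length := by omega
      have h1 : k + 1 < cs.length := by omega
      have e1 : List.drop (k + 1) cs = cs[k + 1] :: cs[k + 2] :: List.drop (k + 3) cs := by
        rw [List.drop_eq_getElem_cons h1,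
            List.drop_eq_getElem_cons (show k + 1 + 1 < cs.length by omega)]
      have e0 : List.drop k cs = cs[k] :: cs[k + 1] :: cs[k + 2] :: List.drop (k + 3) cs := by
        rw [List.drop_eq_getElem_cons h0, e1]
      have hrec : hicLoopA cs (k + 3) = chain3 (cs[k + 1] :: cs[k + 2] :: List.drop (k + 3) cs) := by
        rw [ih cs (k + 1) (by omega), e1]
      rw [hicLoopA, dif_pos hlt, e0]
      simp only [chain3_cons, show k + 2 - 2 = k from rfl, show k + 2 - 1 = k + 1 from rfl,
        show k + 2 + 1 = k + 3 from rfl,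
        List.getD_eq_getElem _ _ h0, List.getD_eq_getElem _ _ h1, List.getD_eq_getElem _ _ hlt,
        hrec]
      have hAB : ((cs[k].toNat : Int) == (cs[k + 2].toNat : Int) - 2
            && (cs[k + 1].toNat : Int) == (cs[k + 2].toNat : Int) - 1)
          = (cs[k + 1].toNat == cs[k].toNat + 1 && cs[k + 2].toNat == cs[k + 1].toNat + 1) := by
        rw [Bool.eq_iff_iff]
        simp only [Bool.and_eq_true, beq_iff_eq]
        omega
      rcases Bool.eq_false_or_eq_true
          (cs[k + 1].toNat == cs[k].toNat + 1 && cs[k + 2].toNat == cs[k + 1].toNat + 1) with hb | hb <;>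
        rw [hAB, hb] <;> simp
    · rw [hicLoopA, dif_neg (by omega)]
      rw [chain3_short _ (by simp; omega)]

theorem hicLoopB_chain3 : ∀ (rest : List Char) (prev : Char),
    hicLoopB prev rest 1 = chain3 (prev :: rest) ∧
    hicLoopB prev rest 2 = ((match rest with
        | [] => false
        | c :: _ => c.toNat == prev.toNat + 1) || chain3 (prev :: rest)) := by
  intro rest
  induction rest with
  | nil => intro prev; constructor <;> rfl
  | cons c rs ih =>
    intro prev
    obtain ⟨ih1, ih2⟩ := ih c
    constructor
    · by_cases hc : (c.toNat == prev.toNat + 1) = true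
      · rw [hicLoopB, if_pos hc]
        simp only [show ¬ (3 ≤ 2) by omega]
        rw [ih2]
        match rs with
        | [] => simp [chain3]
        | z :: r => simp [chain3, hc]
      · rw [hicLoopB, if_neg hc, ih1]
        match rs with
        | [] => simp [chain3]
        | z :: r => simp [chain3, hc]
    · by_cases hc : (c.toNat == prev.toNat + 1) = true
      · rw [hicLoopB, if_pos hc]
        simp [hc]
      · rw [hicLoopB, if_neg hc, ih1]
        match rs with
        | [] => simp [chain3, hc]
        | z :: r => simp [chain3, hc]

-- ===== VERDICT (by name: the statement is the Claim_ definition above) =====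
theorem has_increasing_chain_spec : Claim_equal_has_increasing_chain := by
  intro s _
  unfold Spec_has_increasing_chain has_increasing_chain has_increasing_chain_alt
  have hA : hicLoopA s.toList 2 = chain3 s.toList := by
    have := hicLoopA_eq_chain3 s.toList.length s.toList 0 (by omega)
    simpa using this
  rw [hA]
  match h : s.toList with
  | [] => rfl
  | p :: rest => exact ((hicLoopB_chain3 rest p).1).symm
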